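-- pv_equiv track=rewrite | github.com/aa694849243/leetcode_cj | 701-800/736. Lisp 语法解析（难）.py | parse
-- ===== SOURCE A (Python) =====
-- def parse(s):
--     b = []
--     bal = 0
--     for ch in s.split():
--         bal += ch.count('(') - ch.count(')')
--         b.append(ch)
--         if bal == 0:
--             yield ' '.join(b)
--             b = []
--     if b:
--         yield ' '.join(b)
-- ===== SOURCE B (Python) =====
-- def parse(s):
--     tokens = s.split()
--     # first pass: record the breakpoints where the paren balance returns to zero
--     cuts = []
--     bal = 0
--     for i, t in enumerate(tokens):
--         bal += t.count('(') - t.count(')')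
--         if bal == 0:
--             cuts.append(i + 1)
--     # second pass: emit the slices between consecutive breakpoints
--     prev = 0
--     for c in cuts:
--         yield ' '.join(tokens[prev:c])
--         prev = c
--     if prev < len(tokens):
--         yield ' '.join(tokens[prev:])
-- ===== Notes on version B (the rewrite author's own statement) =====
-- stated objective: alternative
-- what changed: B replaces A's single accumulate-and-flush loop by two passes: it first builds a table of breakpoint indices where the running paren balance hits zero, then emits space-joined slices of the token list between consecutive breakpoints.
import Mathlib
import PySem

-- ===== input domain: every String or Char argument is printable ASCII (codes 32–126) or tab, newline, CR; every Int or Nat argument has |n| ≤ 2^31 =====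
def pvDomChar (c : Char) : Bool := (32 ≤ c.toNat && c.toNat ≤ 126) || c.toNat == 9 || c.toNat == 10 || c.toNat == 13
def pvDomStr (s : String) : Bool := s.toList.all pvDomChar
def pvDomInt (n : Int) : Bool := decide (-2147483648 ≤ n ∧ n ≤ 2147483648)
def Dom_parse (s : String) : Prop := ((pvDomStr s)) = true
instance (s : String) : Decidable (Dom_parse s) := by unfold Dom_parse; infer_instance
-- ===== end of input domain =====

-- B replaces A's single accumulate-and-flush loop by two passes: a breakpoint table, then slice emission.

-- ===== PORT A =====
-- one iteration of A's loop body: state = (b, bal, yielded output so far)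
def parseStepA (st : List String × Int × List String) (ch : String) : List String × Int × List String :=
  let bal := st.2.1 + ((PySem.Str.count ch "(" : Int) - (PySem.Str.count ch ")" : Int))
  let b := st.1 ++ [ch]
  if bal = 0 then ([], bal, st.2.2 ++ [PySem.Str.join " " b])
  else (b, bal, st.2.2)

def parse (s : String) : List String :=
  let r := (PySem.Str.split₀ s).foldl parseStepA ([], 0, [])
  if r.1 ≠ [] then r.2.2 ++ [PySem.Str.join " " r.1] else r.2.2

-- ===== PORT B =====
-- first pass: state = (bal, cuts); appends i+1 whenever bal returns to 0
def parseAltCutsStep (st : Int × List Int) (p : Int × String) : Int × List Int :=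
  let bal := st.1 + ((PySem.Str.count p.2 "(" : Int) - (PySem.Str.count p.2 ")" : Int))
  if bal = 0 then (bal, st.2 ++ [p.1 + 1]) else (bal, st.2)

-- second pass: state = (prev, out); emits ' '.join(tokens[prev:c]) per cut
def parseAltEmitStep (tokens : List String) (st : Int × List String) (c : Int) : Int × List String :=
  (c, st.2 ++ [PySem.Str.join " " (PySem.List.slice tokens (some st.1) (some c))])

def parse_alt (s : String) : List String :=
  let tokens := PySem.Str.split₀ s
  let cuts := ((PySem.List.enumerate tokens 0).foldl parseAltCutsStep (0, [])).2
  let r := cuts.foldl (parseAltEmitStep tokens) (0, [])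
  if r.1 < (tokens.length : Int) then
    r.2 ++ [PySem.Str.join " " (PySem.List.slice tokens (some r.1) none)]
  else r.2

-- ===== PRECONDITION & SPEC =====
def Spec_parse (s : String) (out : List String) : Prop := out = parse_alt s
instance (s : String) (out : List String) : Decidable (Spec_parse s out) := by unfold Spec_parse; infer_instance

-- ===== CLAIM (what is proved, stated in full; the proofs are below) =====
def Claim_equal_parse : Prop := ∀ (s : String), Dom_parse s → Spec_parse s (parse s)

-- ===== LEMMAS AND PROOFS =====

/-- per-token paren balance contribution -/
def cdiff (t : String) : Int := (PySem.Str.count t "(" : Int) - (PySem.Str.count t ")" : Int)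

/-- common recursive specification of the grouping both programs compute -/
def groups : Int → List String → List String → List String
  | _, b, [] => if b ≠ [] then [PySem.Str.join " " b] else []
  | bal, b, t :: ts =>
    if bal + cdiff t = 0 then PySem.Str.join " " (b ++ [t]) :: groups 0 [] ts
    else groups (bal + cdiff t) (b ++ [t]) ts

/-- the breakpoints B's first pass records, as a recursion over the tokens -/
def cutsRec : Int → Int → List String → List Int
  | _, _, [] => []
  | i, bal, t :: ts =>
    if bal + cdiff t = 0 then (i + 1) :: cutsRec (i + 1) 0 ts
    else cutsRec (i + 1) (bal + cdiff t) ts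

theorem lemA (ts : List String) : ∀ (b : List String) (bal : Int) (out : List String),
    (let r := ts.foldl parseStepA (b, bal, out);
     if r.1 ≠ [] then r.2.2 ++ [PySem.Str.join " " r.1] else r.2.2) = out ++ groups bal b ts := by
  induction ts with
  | nil =>
      intro b bal out
      simp only [List.foldl_nil, groups]
      split_ifs <;> simp
  | cons t ts ih =>
      intro b bal out
      simp only [List.foldl_cons, parseStepA]
      rw [show (PySem.Str.count t "(" : Int) - (PySem.Str.count t ")" : Int) = cdiff t from rfl]
      by_cases h : bal + cdiff t = 0
      · rw [if_pos h, h, ih]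
        simp only [groups]
        rw [if_pos h]
        simp
      · rw [if_neg h, ih]
        simp only [groups]
        rw [if_neg h]

theorem lemCuts (ts : List String) : ∀ (i bal : Int) (acc : List Int),
    ((PySem.List.enumerate ts i).foldl parseAltCutsStep (bal, acc)).2 = acc ++ cutsRec i bal ts := by
  induction ts with
  | nil => intro i bal acc; simp [PySem.List.enumerate_nil, cutsRec]
  | cons t ts ih =>
      intro i bal acc
      rw [PySem.List.enumerate_cons, List.foldl_cons]
      simp only [parseAltCutsStep]
      rw [show (PySem.Str.count t "(" : Int) - (PySem.Str.count t ")" : Int) = cdiff t from rfl]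
      simp only [cutsRec]
      by_cases h : bal + cdiff t = 0
      · rw [if_pos h, if_pos h, h, ih]
        simp
      · rw [if_neg h, if_neg h, ih]

theorem lemEmit (tokens : List String) (ts : List String) :
    ∀ (i p : Nat) (bal : Int) (out : List String), p ≤ i → i ≤ tokens.length →
    ts = tokens.drop i →
    (let r := (cutsRec (i : Int) bal ts).foldl (parseAltEmitStep tokens) ((p : Int), out);
     if r.1 < (tokens.length : Int) then
       r.2 ++ [PySem.Str.join " " (PySem.List.slice tokens (some r.1) none)]
     else r.2)
    = out ++ groups bal ((tokens.drop p).take (i - p)) ts := by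
  induction ts with
  | nil =>
      intro i p bal out hpi hil hts
      have hi : i = tokens.length := by
        have h2 := hts.symm
        rw [List.drop_eq_nil_iff] at h2
        omega
      simp only [cutsRec, List.foldl_nil, groups]
      have htake : (tokens.drop p).take (i - p) = tokens.drop p := by
        apply List.take_of_length_le; simp [hi]
      rw [htake, PySem.List.slice_from_natCast]
      by_cases hpl : p < tokens.length
      · rw [if_pos (by exact_mod_cast hpl),
            if_pos (by simp only [ne_eq, List.drop_eq_nil_iff, not_le]; omega)]
      · rw [if_neg (by exact_mod_cast hpl),
            if_neg (by simp only [ne_eq, List.drop_eq_nil_iff, not_le, not_lt]; omega)]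
        simp
  | cons t ts ih =>
      intro i p bal out hpi hil hts
      have hlt : i < tokens.length := by
        by_contra hcon
        rw [List.drop_eq_nil_iff.mpr (by omega)] at hts
        exact List.cons_ne_nil t ts hts
      have hdrop : tokens.drop i = tokens[i] :: tokens.drop (i + 1) :=
        List.drop_eq_getElem_cons hlt
      rw [hdrop] at hts
      injection hts with ht hts'
      have htake : (tokens.drop p).take (i + 1 - p) = (tokens.drop p).take (i - p) ++ [t] := by
        have h1 : i + 1 - p = (i - p) + 1 := by omega
        rw [h1, List.take_add_one]
        congr 1
        have hg : (tokens.drop p)[i - p]? = tokens[p + (i - p)]? := List.getElem?_drop ..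
        rw [hg, show p + (i - p) = i from by omega, List.getElem?_eq_getElem hlt]
        simp [ht]
      have hcast : ((i : Int) + 1) = ((i + 1 : Nat) : Int) := by push_cast; ring
      simp only [cutsRec, groups]
      by_cases h : bal + cdiff t = 0
      · rw [if_pos h, if_pos h]
        rw [List.foldl_cons]
        have hstep : parseAltEmitStep tokens ((p : Int), out) ((i : Int) + 1)
            = (((i + 1 : Nat) : Int), out ++ [PySem.Str.join " " ((tokens.drop p).take (i + 1 - p))]) := by
          simp only [parseAltEmitStep, hcast, PySem.List.slice_natCast]
        rw [hstep, hcast]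
        rw [ih (i + 1) (i + 1) 0 _ (le_refl _) (by omega) hts']
        simp [htake]
      · rw [if_neg h, if_neg h, hcast]
        rw [ih (i + 1) p (bal + cdiff t) out (by omega) (by omega) hts']
        rw [htake]

theorem parse_eq_groups (s : String) :
    parse s = groups 0 [] (PySem.Str.split₀ s) := by
  have h := lemA (PySem.Str.split₀ s) [] 0 []
  simpa [parse] using h

theorem parse_alt_eq_groups (s : String) :
    parse_alt s = groups 0 [] (PySem.Str.split₀ s) := by
  have h1 := lemCuts (PySem.Str.split₀ s) 0 0 []
  have h2 := lemEmit (PySem.Str.split₀ s) (PySem.Str.split₀ s) 0 0 0 [] (le_refl _) (by omega) (by simp)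
  simp only [parse_alt]
  rw [h1]
  simpa using h2

-- ===== VERDICT (by name: the statement is the Claim_ definition above) =====
theorem parse_spec : Claim_equal_parse := by
  intro s _
  unfold Spec_parse
  rw [parse_eq_groups, parse_alt_eq_groups]
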